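-- pv_equiv track=rewrite | github.com/ModeSevenIndustrialSolutions/lftools-ng | src/lftools_ng/core/repository_discovery.py | github_to_gerrit_candidates
-- ===== SOURCE A (Python) =====
-- from typing import Any, Dict, List, Optional, Set, Tuple
--
-- def github_to_gerrit_candidates(github_name: str, project_gerrit_repos: List[str]) -> List[str]:
--     """Find possible Gerrit paths that could map to a GitHub repository name.
--
--     Args:
--         github_name: GitHub repository name
--         project_gerrit_repos: List of all Gerrit repository paths for the project
--
--     Returns:
--         List of possible Gerrit paths (ordered by likelihood)
--     """
--     candidates = []
--     github_lower = github_name.lower()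
--
--     # Direct matches
--     for gerrit_path in project_gerrit_repos:
--         if gerrit_path.lower() == github_lower:
--             candidates.append(gerrit_path)
--
--     # Last component matches
--     for gerrit_path in project_gerrit_repos:
--         if '/' in gerrit_path:
--             last_component = gerrit_path.split('/')[-1].lower()
--             if last_component == github_lower:
--                 candidates.append(gerrit_path)
--
--     # Flattened name matches (convert dashes back to slashes)
--     if '-' in github_name:
--         potential_path = github_name.replace('-', '/')
--         for gerrit_path in project_gerrit_repos:
--             if gerrit_path.lower() == potential_path.lower():
--                 candidates.append(gerrit_path)
--
--     return candidates
-- ===== SOURCE B (Python) =====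
-- def github_to_gerrit_candidates(github_name, project_gerrit_repos):
--     """Index-based lookup: group paths by lowercased full path and by lowercased
--     last component in two dicts built once, then answer by dictionary lookups."""
--     full_index = {}
--     for key, path in ((p.lower(), p) for p in project_gerrit_repos):
--         full_index.setdefault(key, []).append(path)
--     last_index = {}
--     for key, path in ((p.split('/')[-1].lower(), p)
--                       for p in project_gerrit_repos if '/' in p):
--         last_index.setdefault(key, []).append(path)
--     github_lower = github_name.lower()
--     result = full_index.get(github_lower, []) + last_index.get(github_lower, [])
--     if '-' in github_name:
--         result = result + full_index.get(github_name.replace('-', '/').lower(), [])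
--     return result
-- ===== Notes on version B (the rewrite author's own statement) =====
-- stated objective: alternative
-- what changed: Replaces A's three predicate-matching scans over the repo list by building two hash indexes once (lowercased full path -> paths, lowercased last component -> paths) and answering with three dictionary lookups, so no matching scan remains.
import Mathlib
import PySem

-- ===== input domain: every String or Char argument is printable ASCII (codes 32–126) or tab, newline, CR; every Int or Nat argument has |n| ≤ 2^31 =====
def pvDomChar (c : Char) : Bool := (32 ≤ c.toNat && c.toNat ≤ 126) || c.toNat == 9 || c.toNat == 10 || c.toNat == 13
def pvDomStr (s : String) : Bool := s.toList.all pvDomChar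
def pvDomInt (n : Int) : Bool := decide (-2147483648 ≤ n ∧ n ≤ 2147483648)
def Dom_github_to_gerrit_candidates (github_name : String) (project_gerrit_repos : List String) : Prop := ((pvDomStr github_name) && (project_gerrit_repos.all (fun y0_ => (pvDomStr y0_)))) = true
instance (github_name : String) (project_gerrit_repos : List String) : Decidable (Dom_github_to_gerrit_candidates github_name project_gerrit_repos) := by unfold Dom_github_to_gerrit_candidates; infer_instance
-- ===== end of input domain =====

-- B replaces A's three predicate-matching scans by two hash indexes (lowercased
-- full path / lowercased last component -> list of paths) built once and then
-- queried by dictionary lookup (objective: alternative algorithm, same cost).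

-- ===== PORT A =====
def github_to_gerrit_candidates (github_name : String) (project_gerrit_repos : List String) : List String :=
  let github_lower := PySem.Str.lower github_name
  -- direct matches
  let candidates := project_gerrit_repos.foldl
    (fun acc gerrit_path =>
      if PySem.Str.lower gerrit_path == github_lower then acc ++ [gerrit_path] else acc) []
  -- last component matches
  let candidates := project_gerrit_repos.foldl
    (fun acc gerrit_path =>
      if PySem.Str.isIn "/" gerrit_path then
        -- gerrit_path.split('/')[-1].lower(); split('/') is never empty, so [-1] is its last element
        let last_component := PySem.Str.lower (((PySem.Str.split? gerrit_path "/").getD []).getLastD "")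
        if last_component == github_lower then acc ++ [gerrit_path] else acc
      else acc) candidates
  -- flattened name matches
  if PySem.Str.isIn "-" github_name then
    let potential_path := PySem.Str.replace github_name "-" "/"
    project_gerrit_repos.foldl
      (fun acc gerrit_path =>
        if PySem.Str.lower gerrit_path == PySem.Str.lower potential_path then acc ++ [gerrit_path] else acc)
      candidates
  else candidates

-- ===== PORT B =====
def github_to_gerrit_candidates_alt (github_name : String) (project_gerrit_repos : List String) : List String :=
  -- full_index: built from the (p.lower(), p) pair generator by setdefault/append
  let full_index := (project_gerrit_repos.map (fun p => (PySem.Str.lower p, p))).foldl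
    (fun d q => d.modify q.1 [] (· ++ [q.2])) PySem.Dict.empty
  -- last_index: pair generator filters to paths containing '/'
  let last_index := ((project_gerrit_repos.filter (fun p => PySem.Str.isIn "/" p)).map
      (fun p => (PySem.Str.lower (((PySem.Str.split? p "/").getD []).getLastD ""), p))).foldl
    (fun d q => d.modify q.1 [] (· ++ [q.2])) PySem.Dict.empty
  let github_lower := PySem.Str.lower github_name
  let result := full_index.getD github_lower [] ++ last_index.getD github_lower []
  if PySem.Str.isIn "-" github_name then
    result ++ full_index.getD (PySem.Str.lower (PySem.Str.replace github_name "-" "/")) []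
  else result

-- ===== PRECONDITION & SPEC =====
def Spec_github_to_gerrit_candidates (github_name : String) (project_gerrit_repos : List String) (out : List String) : Prop := out = github_to_gerrit_candidates_alt github_name project_gerrit_repos
instance (github_name : String) (project_gerrit_repos : List String) (out : List String) : Decidable (Spec_github_to_gerrit_candidates github_name project_gerrit_repos out) := by unfold Spec_github_to_gerrit_candidates; infer_instance

-- ===== CLAIM =====
def Claim_equal_github_to_gerrit_candidates : Prop := ∀ (github_name : String) (project_gerrit_repos : List String), Dom_github_to_gerrit_candidates github_name project_gerrit_repos → Spec_github_to_gerrit_candidates github_name project_gerrit_repos (github_to_gerrit_candidates github_name project_gerrit_repos)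

-- ===== LEMMAS AND PROOFS =====

-- A dict built by setdefault/append over (key, value) pairs, queried at k,
-- yields exactly the values whose key is k (PySem.Dict.getD_foldl_modify_append),
-- specialised to pairs of the form (key p, p):
theorem index_getD {α : Type} [DecidableEq α] (key : α → α) (xs : List α) (k : α) :
    ((xs.map (fun p => (key p, p))).foldl
        (fun (d : PySem.Dict α (List α)) q => d.modify q.1 [] (· ++ [q.2]))
        PySem.Dict.empty).getD k []
      = xs.filter (fun p => key p == k) := by
  rw [PySem.Dict.getD_foldl_modify_append]
  simp [List.filter_map, Function.comp_def]

-- A's nested-if last-component loop body is the single-condition body.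
theorem nested_if_body (gl : String) :
    (fun (acc : List String) gerrit_path =>
      if PySem.Str.isIn "/" gerrit_path then
        if PySem.Str.lower (((PySem.Str.split? gerrit_path "/").getD []).getLastD "") == gl
          then acc ++ [gerrit_path] else acc
      else acc)
    = (fun acc gerrit_path =>
      if PySem.Str.isIn "/" gerrit_path
           && (PySem.Str.lower (((PySem.Str.split? gerrit_path "/").getD []).getLastD "") == gl)
        then acc ++ [gerrit_path] else acc) := by
  funext acc p
  by_cases h1 : PySem.Str.isIn "/" p = true <;>
    by_cases h2 : (PySem.Str.lower (((PySem.Str.split? p "/").getD []).getLastD "") == gl) = true <;>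
      simp_all

-- ===== VERDICT =====
theorem github_to_gerrit_candidates_spec : Claim_equal_github_to_gerrit_candidates := by
  intro g repos _
  show _ = _
  unfold github_to_gerrit_candidates github_to_gerrit_candidates_alt
  simp only [nested_if_body, PySem.List.foldl_append_if_eq_filter, index_getD,
    List.filter_filter, Bool.and_comm, List.nil_append, List.append_assoc]
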